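-- pv_equiv track=rewrite | github.com/IntheFesh/paper-Phase | scripts/figures/fig5_concordance_pr_curve.py | _match_tolerance
-- ===== SOURCE A (Python) =====
-- from typing import Dict, List, Optional, Set, Tuple
--
-- def _match_tolerance(predicted: Set[int], oracle: Set[int], tol: int = 5) -> Tuple[int, int, int]:
--     matched: Set[int] = set()
--     TP = 0
--     for p in sorted(predicted):
--         for o in sorted(oracle):
--             if abs(p - o) <= tol and o not in matched:
--                 TP += 1
--                 matched.add(o)
--                 break
--     return TP, len(predicted) - TP, len(oracle) - len(matched)
-- ===== SOURCE B (Python) =====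
-- def _match_tolerance(predicted, oracle, tol=5):
--     # sort predictions once, dedupe+sort oracle once, then a single two-pointer sweep
--     P = sorted(predicted)
--     O = sorted(set(oracle))
--     tp = 0
--     j = 0
--     for p in P:
--         while j < len(O) and O[j] < p - tol:
--             j += 1
--         if j < len(O) and O[j] <= p + tol:
--             tp += 1
--             j += 1
--     return tp, len(predicted) - tp, len(oracle) - tp
-- ===== Notes on version B (the rewrite author's own statement) =====
-- stated objective: faster
-- what changed: A rescans (and re-sorts) the whole oracle for every prediction with a 'matched' set; B sorts the predictions once, sorts the deduplicated oracle once, and does a single monotone two-pointer sweep, so the inner scan disappears.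
import Mathlib
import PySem

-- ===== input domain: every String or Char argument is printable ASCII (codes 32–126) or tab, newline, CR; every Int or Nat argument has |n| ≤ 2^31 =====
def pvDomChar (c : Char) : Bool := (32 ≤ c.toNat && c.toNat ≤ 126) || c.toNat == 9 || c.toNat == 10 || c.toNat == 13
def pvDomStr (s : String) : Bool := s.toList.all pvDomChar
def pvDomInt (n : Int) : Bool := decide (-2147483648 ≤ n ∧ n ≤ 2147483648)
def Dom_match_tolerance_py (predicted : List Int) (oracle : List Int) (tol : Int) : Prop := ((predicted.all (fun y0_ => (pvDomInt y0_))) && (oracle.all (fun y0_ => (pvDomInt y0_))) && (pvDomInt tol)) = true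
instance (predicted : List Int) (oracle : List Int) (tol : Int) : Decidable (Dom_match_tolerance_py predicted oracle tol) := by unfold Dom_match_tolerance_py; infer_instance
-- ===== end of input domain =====

-- B replaces A's nested rescans of the oracle by one sorted two-pointer sweep over a
-- deduplicated oracle: O(n log n) instead of O(P·O·log O); same return value everywhere.

-- ===== PORT A =====
-- A-side helper: the inner 'for o in sorted(oracle): if abs(p-o) <= tol and o not in matched: …; break'
def pvInnerA (tol p : Int) (matched : PySem.Set Int) : List Int → Option Int
  | [] => none
  | o :: os => if |p - o| ≤ tol ∧ o ∉ matched then some o else pvInnerA tol p matched os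

-- A-side helper: the outer 'for p in sorted(predicted)' loop, state (matched, TP)
def pvLoopA (tol : Int) (sortedO : List Int) : List Int → PySem.Set Int → Int → PySem.Set Int × Int
  | [], matched, tp => (matched, tp)
  | p :: ps, matched, tp =>
    match pvInnerA tol p matched sortedO with
    | some o => pvLoopA tol sortedO ps (PySem.Set.add matched o) (tp + 1)
    | none   => pvLoopA tol sortedO ps matched tp

def match_tolerance_py (predicted : List Int) (oracle : List Int) (tol : Int) : List Int :=
  let st := pvLoopA tol (PySem.List.sorted oracle (fun x => x) false)
              (PySem.List.sorted predicted (fun x => x) false) PySem.Set.empty 0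
  [st.2, (predicted.length : Int) - st.2, (oracle.length : Int) - (st.1.length : Int)]

-- ===== PORT B =====
-- B-side helper: 'while j < len(O) and O[j] < p - tol: j += 1', as the remaining suffix of O
def pvSkipB (tol p : Int) : List Int → List Int
  | [] => []
  | o :: os => if o < p - tol then pvSkipB tol p os else o :: os

-- B-side helper: the 'for p in P' two-pointer loop of Source B
def pvLoopB (tol : Int) : List Int → List Int → Int → Int
  | [], _, tp => tp
  | p :: ps, os, tp =>
    match pvSkipB tol p os with
    | [] => pvLoopB tol ps [] tp
    | o :: os' => if o ≤ p + tol then pvLoopB tol ps os' (tp + 1) else pvLoopB tol ps (o :: os') tp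

def match_tolerance_py_alt (predicted : List Int) (oracle : List Int) (tol : Int) : List Int :=
  let P := PySem.List.sorted predicted (fun x => x) false
  let O := PySem.List.sorted (PySem.Set.ofList oracle) (fun x => x) false
  let tp := pvLoopB tol P O 0
  [tp, (predicted.length : Int) - tp, (oracle.length : Int) - tp]

-- ===== PRECONDITION & SPEC =====
def Spec_match_tolerance_py (predicted : List Int) (oracle : List Int) (tol : Int) (out : List Int) : Prop := out = match_tolerance_py_alt predicted oracle tol
instance (predicted : List Int) (oracle : List Int) (tol : Int) (out : List Int) : Decidable (Spec_match_tolerance_py predicted oracle tol out) := by unfold Spec_match_tolerance_py; infer_instance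

-- ===== CLAIM (what is proved, stated in full; the proofs are below) =====
def Claim_equal_match_tolerance_py : Prop := ∀ (predicted : List Int) (oracle : List Int) (tol : Int), Dom_match_tolerance_py predicted oracle tol → Spec_match_tolerance_py predicted oracle tol (match_tolerance_py predicted oracle tol)

-- ===== LEMMAS AND PROOFS =====

lemma pvInnerA_none {tol p : Int} {matched : PySem.Set Int} {l : List Int}
    (h : ∀ o ∈ l, ¬(|p - o| ≤ tol ∧ o ∉ matched)) : pvInnerA tol p matched l = none := by
  induction l with
  | nil => rfl
  | cons o os ih =>
    simp only [pvInnerA]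
    rw [if_neg (h o (by simp))]
    exact ih (fun o' ho' => h o' (by simp [ho']))

lemma pvInnerA_append {tol p : Int} {matched : PySem.Set Int} {l₁ l₂ : List Int}
    (h : ∀ o ∈ l₁, ¬(|p - o| ≤ tol ∧ o ∉ matched)) :
    pvInnerA tol p matched (l₁ ++ l₂) = pvInnerA tol p matched l₂ := by
  induction l₁ with
  | nil => rfl
  | cons o os ih =>
    simp only [List.cons_append, pvInnerA]
    rw [if_neg (h o (by simp))]
    exact ih (fun o' ho' => h o' (by simp [ho']))

-- first hit of the inner scan, characterised on a (≤-)sorted list: it is the least eligible value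
lemma pvInnerA_some_iff {tol p : Int} {matched : PySem.Set Int} {l : List Int}
    (hs : l.Sorted (· ≤ ·)) {v : Int} :
    pvInnerA tol p matched l = some v ↔
      (v ∈ l ∧ (|p - v| ≤ tol ∧ v ∉ matched) ∧
        ∀ w ∈ l, (|p - w| ≤ tol ∧ w ∉ matched) → v ≤ w) := by
  induction l with
  | nil => simp [pvInnerA]
  | cons o os ih =>
    have hs' : os.Sorted (· ≤ ·) := hs.of_cons
    by_cases hc : |p - o| ≤ tol ∧ o ∉ matched
    · simp only [pvInnerA, if_pos hc]
      constructor
      · rintro h; cases h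
        refine ⟨by simp, hc, ?_⟩
        intro w hw _
        rcases List.mem_cons.1 hw with rfl | hw
        · exact le_refl _
        · exact (List.sorted_cons.1 hs).1 w hw
      · rintro ⟨hv, hcv, hmin⟩
        have h1 : v ≤ o := hmin o (by simp) hc
        have h2 : o ≤ v := by
          rcases List.mem_cons.1 hv with rfl | hv
          · exact le_refl _
          · exact (List.sorted_cons.1 hs).1 v hv
        exact congrArg some (le_antisymm h2 h1)
    · simp only [pvInnerA, if_neg hc]
      rw [ih hs']
      constructor
      · rintro ⟨hv, hcv, hmin⟩
        refine ⟨by simp [hv], hcv, ?_⟩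
        intro w hw hcw
        rcases List.mem_cons.1 hw with rfl | hw
        · exact absurd hcw hc
        · exact hmin w hw hcw
      · rintro ⟨hv, hcv, hmin⟩
        rcases List.mem_cons.1 hv with rfl | hv
        · exact absurd hcv hc
        · exact ⟨hv, hcv, fun w hw hcw => hmin w (by simp [hw]) hcw⟩

lemma pvInnerA_ne_none {tol p : Int} {matched : PySem.Set Int} {l : List Int} {v : Int}
    (hv : v ∈ l) (hc : |p - v| ≤ tol ∧ v ∉ matched) : pvInnerA tol p matched l ≠ none := by
  induction l with
  | nil => cases hv
  | cons o os ih =>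
    simp only [pvInnerA]
    split_ifs with hc'
    · simp
    · rcases List.mem_cons.1 hv with rfl | hv'
      · exact absurd hc hc'
      · exact ih hv'

-- the inner scan only depends on the SET of values when the list is ≤-sorted
lemma pvInnerA_congr {tol p : Int} {matched : PySem.Set Int} {l₁ l₂ : List Int}
    (hs₁ : l₁.Sorted (· ≤ ·)) (hs₂ : l₂.Sorted (· ≤ ·)) (hm : ∀ x, x ∈ l₁ ↔ x ∈ l₂) :
    pvInnerA tol p matched l₁ = pvInnerA tol p matched l₂ := by
  cases h₁ : pvInnerA tol p matched l₁ with
  | some v =>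
    obtain ⟨hv, hcv, hmin⟩ := (pvInnerA_some_iff hs₁).1 h₁
    exact ((pvInnerA_some_iff hs₂).2
      ⟨(hm v).1 hv, hcv, fun w hw hcw => hmin w ((hm w).2 hw) hcw⟩).symm
  | none =>
    cases h₂ : pvInnerA tol p matched l₂ with
    | none => rfl
    | some v =>
      obtain ⟨hv, hcv, _⟩ := (pvInnerA_some_iff hs₂).1 h₂
      exact absurd h₁ (pvInnerA_ne_none ((hm v).2 hv) hcv)

-- A's outer loop only depends on the oracle list through that set, too
lemma pvLoopA_congr {tol : Int} {O₁ O₂ : List Int}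
    (hs₁ : O₁.Sorted (· ≤ ·)) (hs₂ : O₂.Sorted (· ≤ ·)) (hm : ∀ x, x ∈ O₁ ↔ x ∈ O₂) :
    ∀ (P : List Int) (matched : PySem.Set Int) (tp : Int),
      pvLoopA tol O₁ P matched tp = pvLoopA tol O₂ P matched tp := by
  intro P
  induction P with
  | nil => intro matched tp; rfl
  | cons p ps ih =>
    intro matched tp
    simp only [pvLoopA, pvInnerA_congr hs₁ hs₂ hm]
    cases pvInnerA tol p matched O₂ <;> simp [ih]

lemma pvInnerA_some_spec {tol p : Int} {matched : PySem.Set Int} {l : List Int} {v : Int}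
    (h : pvInnerA tol p matched l = some v) : |p - v| ≤ tol ∧ v ∉ matched := by
  induction l with
  | nil => exact absurd h (by simp [pvInnerA])
  | cons o os ih =>
    simp only [pvInnerA] at h
    split_ifs at h with hc
    · cases h; exact hc
    · exact ih h

-- TP counts exactly the insertions into 'matched'
lemma pvLoopA_len {tol : Int} {O : List Int} :
    ∀ (P : List Int) (matched : PySem.Set Int) (tp : Int),
      ((pvLoopA tol O P matched tp).1.length : Int) - matched.length
        = (pvLoopA tol O P matched tp).2 - tp := by
  intro P
  induction P with
  | nil => intro matched tp; simp [pvLoopA]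
  | cons p ps ih =>
    intro matched tp
    cases h : pvInnerA tol p matched O with
    | none => simp only [pvLoopA, h]; exact ih matched tp
    | some o =>
      simp only [pvLoopA, h]
      have hno : o ∉ matched := (pvInnerA_some_spec h).2
      have hadd : PySem.Set.add matched o = matched ++ [o] := by
        simp [PySem.Set.add, hno]
      have := ih (PySem.Set.add matched o) (tp + 1)
      rw [hadd] at this ⊢
      simp only [List.length_append, List.length_cons, List.length_nil] at this
      omega

lemma pvSkipB_decomp (tol p : Int) : ∀ l : List Int,
    ∃ sk, l = sk ++ pvSkipB tol p l ∧ ∀ o ∈ sk, o < p - tol := by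
  intro l
  induction l with
  | nil => exact ⟨[], rfl, by simp⟩
  | cons o os ih =>
    by_cases h : o < p - tol
    · obtain ⟨sk, heq, hlt⟩ := ih
      refine ⟨o :: sk, ?_, ?_⟩
      · simp only [pvSkipB, if_pos h]; rw [List.cons_append, ← heq]
      · intro o' ho'; rcases List.mem_cons.1 ho' with rfl | ho' <;> [exact h; exact hlt o' ho']
    · exact ⟨[], by simp [pvSkipB, h], by simp⟩

lemma pvSkipB_head {tol p : Int} : ∀ {l : List Int} {o : Int} {os : List Int},
    pvSkipB tol p l = o :: os → ¬ o < p - tol := by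
  intro l
  induction l with
  | nil => intro o os h; exact absurd h (by simp [pvSkipB])
  | cons a as ih =>
    intro o os h
    simp only [pvSkipB] at h
    split_ifs at h with ha
    · exact ih h
    · cases h; exact ha

-- the central invariant: A's scan over pre ++ rem with 'matched ⊆ pre' and all unmatched
-- elements of pre dead for every remaining p, versus B's two-pointer suffix rem
lemma pvMain (tol : Int) : ∀ (P pre rem : List Int) (matched : PySem.Set Int) (tp : Int),
    P.Sorted (· ≤ ·) → (pre ++ rem).Sorted (· < ·) →
    (∀ o ∈ matched, o ∈ pre) → (∀ o ∈ rem, o ∉ matched) →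
    (∀ o ∈ pre, o ∉ matched → ∀ q ∈ P, o < q - tol) →
    (pvLoopA tol (pre ++ rem) P matched tp).2 = pvLoopB tol P rem tp := by
  intro P
  induction P with
  | nil => intro pre rem matched tp _ _ _ _ _; rfl
  | cons p ps ih =>
    intro pre rem matched tp hP hO hsub hrem hdead
    have hP' : ps.Sorted (· ≤ ·) := hP.of_cons
    have hple : ∀ q ∈ ps, p ≤ q := (List.sorted_cons.1 hP).1
    have hpredead : ∀ o ∈ pre, ¬(|p - o| ≤ tol ∧ o ∉ matched) := by
      intro o ho hc
      have := hdead o ho hc.2 p (by simp)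
      have : |p - o| > tol := lt_of_lt_of_le (by omega) (le_abs_self (p - o))
      omega
    obtain ⟨sk, hsk, hsklt⟩ := pvSkipB_decomp tol p rem
    have hskdead : ∀ o ∈ sk, ¬(|p - o| ≤ tol ∧ o ∉ matched) := by
      intro o ho hc
      have h1 := hsklt o ho
      have : |p - o| ≥ p - o := le_abs_self (p - o)
      omega
    have hinner : pvInnerA tol p matched (pre ++ rem)
        = pvInnerA tol p matched (pvSkipB tol p rem) := by
      conv_lhs => rw [pvInnerA_append hpredead, hsk]
      rw [pvInnerA_append hskdead]
    have hremsorted : rem.Sorted (· < ·) := ((List.pairwise_append).1 hO).2.1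
    simp only [pvLoopA, hinner]
    cases hr : pvSkipB tol p rem with
    | nil =>
      rw [pvInnerA_none (by simp)]
      simp only [pvLoopB, hr]
      have heq : pre ++ rem = (pre ++ rem) ++ [] := by simp
      rw [heq]
      refine ih (pre ++ rem) [] matched tp hP' (by simpa using hO) ?_ (by simp) ?_
      · intro o ho; exact List.mem_append_left _ (hsub o ho)
      · intro o ho hom q hq
        rcases List.mem_append.1 ho with ho | ho
        · exact hdead o ho hom q (by simp [hq])
        · have h1 : o ∈ sk := by
            rw [hsk, hr] at ho; simpa using ho
          have := hsklt o h1
          have := hple q hq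
          omega
    | cons o₀ os₀ =>
      have ho₀ge : ¬ o₀ < p - tol := pvSkipB_head (hr ▸ rfl : pvSkipB tol p rem = o₀ :: os₀)
      have hremdec : rem = sk ++ (o₀ :: os₀) := by rw [hsk, hr]
      have ho₀rem : o₀ ∈ rem := by rw [hremdec]; simp
      have ho₀nm : o₀ ∉ matched := hrem o₀ ho₀rem
      have hsuffsorted : (o₀ :: os₀).Sorted (· < ·) := by
        rw [hremdec] at hremsorted
        exact ((List.pairwise_append).1 hremsorted).2.1
      have hOdec : pre ++ rem = (pre ++ sk) ++ (o₀ :: os₀) := by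
        rw [hremdec, List.append_assoc]
      by_cases hle : o₀ ≤ p + tol
      · have : pvInnerA tol p matched (o₀ :: os₀) = some o₀ := by
          simp only [pvInnerA]
          rw [if_pos ⟨by rw [abs_le]; omega, ho₀nm⟩]
        rw [this]
        simp only [pvLoopB, hr, if_pos hle]
        rw [hOdec, show (pre ++ sk) ++ (o₀ :: os₀) = ((pre ++ sk) ++ [o₀]) ++ os₀ by simp]
        refine ih ((pre ++ sk) ++ [o₀]) os₀ (PySem.Set.add matched o₀) (tp + 1) hP' ?_ ?_ ?_ ?_
        · rw [show ((pre ++ sk) ++ [o₀]) ++ os₀ = pre ++ rem by rw [hremdec]; simp]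
          exact hO
        · intro o ho
          rw [PySem.Set.mem_add] at ho
          rcases ho with ho | rfl
          · exact List.mem_append_left _ (List.mem_append_left _ (hsub o ho))
          · simp
        · intro o ho
          rw [PySem.Set.mem_add]
          push_neg
          constructor
          · exact hrem o (by rw [hremdec]; simp [ho])
          · intro rfl'
            have := (List.sorted_cons.1 hsuffsorted).1 o ho
            omega
        · intro o ho hom q hq
          rw [PySem.Set.mem_add] at hom
          push_neg at hom
          have hpq := hple q hq
          rcases List.mem_append.1 ho with ho | ho
          · rcases List.mem_append.1 ho with ho | ho
            · exact hdead o ho hom.1 q (by simp [hq])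
            · have := hsklt o ho; omega
          · simp at ho; exact absurd ho hom.2
      · have : pvInnerA tol p matched (o₀ :: os₀) = none := by
          apply pvInnerA_none
          intro o ho hc
          rcases List.mem_cons.1 ho with rfl | ho
          · have := abs_le.1 hc.1; omega
          · have := (List.sorted_cons.1 hsuffsorted).1 o ho
            have := abs_le.1 hc.1
            omega
        rw [this]
        simp only [pvLoopB, hr, if_neg hle]
        rw [hOdec]
        refine ih (pre ++ sk) (o₀ :: os₀) matched tp hP' (by rw [← hOdec]; exact hO) ?_ ?_ ?_
        · intro o ho; exact List.mem_append_left _ (hsub o ho)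
        · intro o ho; exact hrem o (by rw [hremdec]; exact List.mem_append_right _ ho)
        · intro o ho hom q hq
          have hpq := hple q hq
          rcases List.mem_append.1 ho with ho | ho
          · exact hdead o ho hom q (by simp [hq])
          · have := hsklt o ho; omega

-- ===== VERDICT (by name: the statement is the Claim_ definition above) =====
theorem match_tolerance_py_spec : Claim_equal_match_tolerance_py := by
  intro predicted oracle tol _
  unfold Spec_match_tolerance_py match_tolerance_py match_tolerance_py_alt
  have hOs : (PySem.List.sorted oracle (fun x => x) false).Sorted (· ≤ ·) :=
    PySem.List.sorted_pairwise oracle (fun x => x)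
  have hDs : (PySem.List.sorted (PySem.Set.ofList oracle) (fun x => x) false).Sorted (· ≤ ·) :=
    PySem.List.sorted_pairwise (PySem.Set.ofList oracle) (fun x => x)
  have hDnd : (PySem.List.sorted (PySem.Set.ofList oracle) (fun x => x) false).Nodup :=
    (PySem.List.sorted_perm (PySem.Set.ofList oracle) (fun x => x) false).nodup_iff.2
      (PySem.Set.nodup_ofList oracle)
  have hDlt : (PySem.List.sorted (PySem.Set.ofList oracle) (fun x => x) false).Sorted (· < ·) :=
    (hDs.and hDnd).imp (fun hab => lt_of_le_of_ne hab.1 hab.2)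
  have hmem : ∀ x, x ∈ PySem.List.sorted oracle (fun x => x) false
      ↔ x ∈ PySem.List.sorted (PySem.Set.ofList oracle) (fun x => x) false := by
    intro x
    rw [(PySem.List.sorted_perm oracle (fun x => x) false).mem_iff,
        (PySem.List.sorted_perm (PySem.Set.ofList oracle) (fun x => x) false).mem_iff,
        PySem.Set.mem_ofList]
  have hPs : (PySem.List.sorted predicted (fun x => x) false).Sorted (· ≤ ·) :=
    PySem.List.sorted_pairwise predicted (fun x => x)
  have hcongr := pvLoopA_congr (tol := tol) hOs hDs hmem
      (PySem.List.sorted predicted (fun x => x) false) PySem.Set.empty 0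
  have hmain := pvMain tol (PySem.List.sorted predicted (fun x => x) false) []
      (PySem.List.sorted (PySem.Set.ofList oracle) (fun x => x) false) PySem.Set.empty 0
      hPs (by simpa using hDlt) (by simp [PySem.Set.empty]) (by simp [PySem.Set.empty])
      (by simp [PySem.Set.empty])
  simp only [List.nil_append] at hmain
  have hlen := pvLoopA_len (tol := tol)
      (O := PySem.List.sorted (PySem.Set.ofList oracle) (fun x => x) false)
      (PySem.List.sorted predicted (fun x => x) false) PySem.Set.empty 0
  rw [hmain] at hlen
  simp only [PySem.Set.empty, List.length_nil, Int.natCast_zero, sub_zero] at hlen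
  simp only [PySem.Set.empty] at hcongr hmain hlen ⊢
  simp only [hcongr, hmain, hlen]
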